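-- pv_equiv track=rewrite | github.com/pyneng/pyneng-course-examples | examples/09_functions/examples_06_select_correct_passwd.py | select_correct_password
-- ===== SOURCE A (Python) =====
-- def password_check(user, passwd, min_len=8, spec_symbols=2):
--     spec_symbols_str = "$#@%_+"
--     if len(passwd) < min_len:
--         return False
--     elif user.lower() in passwd.lower():
--         return False
--     elif len(set(spec_symbols_str) & set(passwd)) < 2:
--         return False
--     else:
--         return True
--
-- def select_correct_password(user_passwd_list):
--     password_ok = []
--     password_not_ok = []
--     for username, password in user_passwd_list:
--         passwd_status = password_check(username, password)
--         if passwd_status: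
--             password_ok.append([username, password])
--         else:
--             password_not_ok.append([username, password])
--     return (password_ok, password_not_ok)
-- ===== SOURCE B (Python) =====
-- def password_check(user, passwd, min_len=8, spec_symbols=2):
--     spec_symbols_str = "$#@%_+"
--     return (len(passwd) >= min_len
--             and user.lower() not in passwd.lower()
--             and sum(c in passwd for c in spec_symbols_str) >= 2)
--
-- def select_correct_password(user_passwd_list):
--     ok = [[u, p] for u, p in user_passwd_list if password_check(u, p)]
--     not_ok = [[u, p] for u, p in user_passwd_list if not password_check(u, p)]
--     return (ok, not_ok)
-- ===== Notes on version B (the rewrite author's own statement) =====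
-- stated objective: idiomatic
-- what changed: The single accumulate-into-two-lists for-loop is replaced by two independent list comprehensions filtering the pairs by validity, and password_check becomes one boolean conjunction (with the set intersection replaced by a direct count of special characters present).
import Mathlib
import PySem

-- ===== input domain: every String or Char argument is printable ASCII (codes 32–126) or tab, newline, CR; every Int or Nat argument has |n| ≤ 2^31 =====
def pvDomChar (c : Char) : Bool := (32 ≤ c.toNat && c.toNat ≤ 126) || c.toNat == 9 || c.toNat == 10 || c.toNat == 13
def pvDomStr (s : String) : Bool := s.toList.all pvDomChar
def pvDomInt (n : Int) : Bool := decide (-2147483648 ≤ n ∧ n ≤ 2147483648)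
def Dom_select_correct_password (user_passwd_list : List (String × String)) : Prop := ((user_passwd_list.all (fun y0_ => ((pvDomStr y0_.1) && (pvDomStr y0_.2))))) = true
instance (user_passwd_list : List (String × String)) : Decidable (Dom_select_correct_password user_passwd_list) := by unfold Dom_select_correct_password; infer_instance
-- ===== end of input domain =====

-- B replaces the two-accumulator loop by two filtering list comprehensions and flattens password_check to one conjunction; same cost, more idiomatic.

-- ===== PORT A =====
def password_check (user : String) (passwd : String) (min_len : Int) (spec_symbols : Int) : Bool :=
  let spec_symbols_str : String := "$#@%_+"
  if (PySem.Str.len passwd : Int) < min_len then false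
  else if PySem.Str.isIn (PySem.Str.lower user) (PySem.Str.lower passwd) then false
  else if (PySem.Set.inter (PySem.Set.ofList spec_symbols_str.toList) (PySem.Set.ofList passwd.toList)).length < 2 then false
  else true

def select_correct_password (user_passwd_list : List (String × String)) : List (List String) × List (List String) :=
  let r := user_passwd_list.foldl
    (fun (acc : List (List String) × List (List String)) up =>
      let passwd_status := password_check up.1 up.2 8 2
      if passwd_status then (acc.1 ++ [[up.1, up.2]], acc.2)
      else (acc.1, acc.2 ++ [[up.1, up.2]]))
    ([], [])
  (r.1, r.2)

-- ===== PORT B =====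
def password_check_alt (user : String) (passwd : String) (min_len : Int) (spec_symbols : Int) : Bool :=
  let spec_symbols_str : String := "$#@%_+"
  decide (min_len ≤ (PySem.Str.len passwd : Int))
    && !(PySem.Str.isIn (PySem.Str.lower user) (PySem.Str.lower passwd))
    && decide (2 ≤ (spec_symbols_str.toList.map
          (fun c => if passwd.toList.contains c then (1 : Int) else 0)).sum)

def select_correct_password_alt (user_passwd_list : List (String × String)) : List (List String) × List (List String) :=
  ((user_passwd_list.filter (fun up => password_check_alt up.1 up.2 8 2)).map (fun up => [up.1, up.2]),
   (user_passwd_list.filter (fun up => !password_check_alt up.1 up.2 8 2)).map (fun up => [up.1, up.2]))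

-- ===== PRECONDITION & SPEC =====
def Spec_select_correct_password (user_passwd_list : List (String × String)) (out : List (List String) × List (List String)) : Prop := out = select_correct_password_alt user_passwd_list
instance (user_passwd_list : List (String × String)) (out : List (List String) × List (List String)) : Decidable (Spec_select_correct_password user_passwd_list out) := by unfold Spec_select_correct_password; infer_instance

-- ===== CLAIM (what is proved, stated in full; the proofs are below) =====
def Claim_equal_select_correct_password : Prop := ∀ (user_passwd_list : List (String × String)), Dom_select_correct_password user_passwd_list → Spec_select_correct_password user_passwd_list (select_correct_password user_passwd_list)

-- ===== LEMMAS AND PROOFS =====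

-- the 0/1-sum in B counts exactly the distinct special characters present in passwd
lemma check_agree (user passwd : String) :
    password_check user passwd 8 2 = password_check_alt user passwd 8 2 := by
  have hcount : (PySem.Set.inter (PySem.Set.ofList "$#@%_+".toList)
        (PySem.Set.ofList passwd.toList)).length
      = "$#@%_+".toList.countP (fun c => passwd.toList.contains c) := by
    rw [show PySem.Set.ofList "$#@%_+".toList = "$#@%_+".toList from by decide,
      List.countP_eq_length_filter]
    congr 1
    apply List.filter_congr
    intro c _
    simp [PySem.Set.mem_ofList]
  simp only [password_check, password_check_alt,
    PySem.List.sum_map_ite_one_zero, hcount]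
  split_ifs with h1 h2 h3
  · simp only [pysem] at h1
    simp
    intro h _
    rw [← String.length_toList] at h
    omega
  · simp only [pysem] at h2
    simp
    intro _ hI
    rw [PySem.Chars.isIn_eq_false_iff] at hI
    exact absurd h2 hI
  · simp only [pysem] at h3
    simp
    intro _ _
    have hc : List.countP passwd.toList.contains ['$', '#', '@', '%', '_', '+']
        = List.countP (fun c => decide (c ∈ passwd.toList)) ['$', '#', '@', '%', '_', '+'] :=
      List.countP_congr (fun x _ => by simp)
    rw [hc]
    simp at h3
    omega
  · simp only [pysem, not_lt] at h1 h2 h3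
    simp
    refine ⟨⟨?_, ?_⟩, ?_⟩
    · rw [← String.length_toList]
      exact_mod_cast h1
    · rw [PySem.Chars.isIn_eq_false_iff]
      exact h2
    · have hc : List.countP passwd.toList.contains ['$', '#', '@', '%', '_', '+']
        = List.countP (fun c => decide (c ∈ passwd.toList)) ['$', '#', '@', '%', '_', '+'] :=
      List.countP_congr (fun x _ => by simp)
      rw [hc]
      simpa using h3

-- loop invariant for A's fold
lemma fold_partition (l : List (String × String)) (ok nok : List (List String)) :
    l.foldl (fun (acc : List (List String) × List (List String)) up =>
        let passwd_status := password_check up.1 up.2 8 2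
        if passwd_status then (acc.1 ++ [[up.1, up.2]], acc.2)
        else (acc.1, acc.2 ++ [[up.1, up.2]])) (ok, nok)
      = (ok ++ (l.filter (fun up => password_check_alt up.1 up.2 8 2)).map (fun up => [up.1, up.2]),
         nok ++ (l.filter (fun up => !password_check_alt up.1 up.2 8 2)).map (fun up => [up.1, up.2])) := by
  induction l generalizing ok nok with
  | nil => simp
  | cons hd tl ih =>
    simp only [List.foldl_cons, List.filter_cons]
    rw [check_agree hd.1 hd.2]
    by_cases h : password_check_alt hd.1 hd.2 8 2 = true
    · simp [h, ih]
    · simp [Bool.eq_false_iff.mpr h, ih]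

-- ===== VERDICT (by name: the statement is the Claim_ definition above) =====
theorem select_correct_password_spec : Claim_equal_select_correct_password := by
  intro l _
  show _ = _
  simp only [select_correct_password, select_correct_password_alt]
  rw [fold_partition l [] []]
  simp
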